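-- pv_equiv track=rewrite | github.com/berkeberkay/P2P-File-Sharing-Application | container/cont2/AITermProject/game.py | check_line_capture
-- ===== SOURCE A (Python) =====
-- def check_line_capture(line, board):
--
--     symbols = []    # sembolleri saklamak için r liste
--     for r, c in line:
--         symbols.append(board[r][c])   # sembolü listeye ekle
--
--     captured_positions = []    # captured pozisyonları saklamak için liste
--
--
--     def check_segment(start, end):
--
--         base_char = symbols[start]
--
--         if base_char == '.':
--             return
--
--         for i in range(start + 1, end + 1):
--             if symbols[i] != base_char:
--                 return
--
--         if base_char == 'T':
--             enemy_char = 'O'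
--         else:
--             enemy_char = 'T'
--
--         left_boundary = symbols[start - 1] if start > 0 else None
--         right_boundary = symbols[end + 1] if end < len(symbols) - 1 else None
--
--         left_is_enemy = (left_boundary == enemy_char)
--         right_is_enemy = (right_boundary == enemy_char)
--         left_is_wall = (start == 0)
--         right_is_wall = (end == len(symbols) - 1)
--
--         if (left_is_wall and right_is_enemy) or (right_is_wall and left_is_enemy) or (left_is_enemy and right_is_enemy):
--             for i in range(start, end + 1):
--                 captured_positions.append(line[i])
--
--     i = 0
--     while i < len(symbols):
--         if symbols[i] == '.':
--             i += 1
--             continue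
--         j = i
--         while j + 1 < len(symbols) and symbols[j + 1] == symbols[i]:
--             j += 1
--         check_segment(i, j)
--         i = j + 1
--
--     return captured_positions
-- ===== SOURCE B (Python) =====
-- def check_line_capture(line, board):
--     symbols = [board[r][c] for r, c in line]
--     n = len(symbols)
--     # run_start[i]: leftmost index of the maximal equal run containing i (forward DP)
--     run_start = []
--     for i in range(n):
--         run_start.append(run_start[-1] if i > 0 and symbols[i] == symbols[i - 1] else i)
--     # run_end[i]: rightmost index of that run (backward DP)
--     run_end = []
--     for i in reversed(range(n)):
--         run_end.append(run_end[-1] if i < n - 1 and symbols[i] == symbols[i + 1] else i)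
--     run_end.reverse()
--     captured = []
--     for i in range(n):
--         ch = symbols[i]
--         if ch == '.':
--             continue
--         enemy = 'O' if ch == 'T' else 'T'
--         s, e = run_start[i], run_end[i]
--         left_is_enemy = s > 0 and symbols[s - 1] == enemy
--         right_is_enemy = e < n - 1 and symbols[e + 1] == enemy
--         if (s == 0 and right_is_enemy) or (e == n - 1 and left_is_enemy) or (left_is_enemy and right_is_enemy):
--             captured.append(line[i])
--     return captured
-- ===== Notes on version B (the rewrite author's own statement) =====
-- stated objective: alternative
-- what changed: A's run enumeration (nested while loops with a rescanning per-segment closure) is replaced by two dynamic-programming passes that compute per-index run-start and run-end arrays and a per-index filter that appends line[i] directly; no segment list or run enumeration exists in B.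
import Mathlib
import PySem

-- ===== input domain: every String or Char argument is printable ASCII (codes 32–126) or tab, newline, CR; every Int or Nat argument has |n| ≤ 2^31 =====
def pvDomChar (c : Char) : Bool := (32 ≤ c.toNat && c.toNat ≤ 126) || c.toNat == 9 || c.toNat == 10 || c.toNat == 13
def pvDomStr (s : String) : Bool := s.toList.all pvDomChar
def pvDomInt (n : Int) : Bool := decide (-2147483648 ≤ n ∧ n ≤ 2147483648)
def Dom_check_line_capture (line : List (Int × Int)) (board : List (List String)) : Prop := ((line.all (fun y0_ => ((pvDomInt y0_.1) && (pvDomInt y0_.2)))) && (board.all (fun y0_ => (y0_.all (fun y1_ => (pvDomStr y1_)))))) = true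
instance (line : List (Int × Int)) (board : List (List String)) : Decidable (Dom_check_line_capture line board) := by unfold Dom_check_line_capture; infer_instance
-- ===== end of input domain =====

-- B replaces A's run enumeration (nested while loops plus a rescanning per-segment closure) with two
-- dynamic-programming passes that compute per-index run-start and run-end arrays and one per-index
-- filter that appends line[i] directly; objective: alternative decomposition, same O(n) cost.

-- symbols = [board[r][c] for r, c in line]  (shared by both programs, identical in both Pythons;
-- outside Pre_ Python raises IndexError and the port's getD "" default is never exercised)
def pvSyms (line : List (Int × Int)) (board : List (List String)) : List String :=
  line.map (fun p => ((PySem.List.pyGet? board p.1).bind (fun row => PySem.List.pyGet? row p.2)).getD "")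

-- ===== PORT A =====
-- inner while: j extension loop  'while j + 1 < len(symbols) and symbols[j+1] == symbols[i]: j += 1'
-- (structural recursion on the fuel sym.length - j, which bounds the remaining iterations)
def aFindJF (sym : List String) (base : String) : Nat → Nat → Nat
  | 0, j => j
  | fuel + 1, j =>
    if j + 1 < sym.length ∧ sym.getD (j + 1) "" = base then aFindJF sym base fuel (j + 1) else j

def aFindJ (sym : List String) (base : String) (j : Nat) : Nat :=
  aFindJF sym base (sym.length - j) j

-- check_segment's verification loop 'for i in range(start+1, end+1): if symbols[i] != base: return'
-- (structural recursion on the fuel e + 1 - i, the number of remaining loop indices)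
def aScanF (sym : List String) (base : String) : Nat → Nat → Nat → Bool
  | 0, _, _ => true
  | fuel + 1, i, e =>
    if i < e + 1 then
      if sym.getD i "" ≠ base then false else aScanF sym base fuel (i + 1) e
    else true

def aScan (sym : List String) (base : String) (i e : Nat) : Bool :=
  aScanF sym base (e + 1 - i) i e

-- check_segment(start, end): the chunk it appends to captured_positions (possibly [])
def aCheckSeg (sym : List String) (line : List (Int × Int)) (s e : Nat) : List (Int × Int) :=
  let base := sym.getD s ""
  if base = "." then []
  else if aScan sym base (s + 1) e = false then []
  else
    let enemy := if base = "T" then "O" else "T"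
    let leftB : Option String := if 0 < s then some (sym.getD (s - 1) "") else none
    let rightB : Option String := if e < sym.length - 1 then some (sym.getD (e + 1) "") else none
    let leftE := leftB = some enemy
    let rightE := rightB = some enemy
    if (s = 0 ∧ rightE) ∨ (e = sym.length - 1 ∧ leftE) ∨ (leftE ∧ rightE) then
      (List.range' s (e + 1 - s)).foldl (fun acc k => acc ++ [line.getD k (0, 0)]) []
    else []

-- outer while loop over i (structural recursion on the fuel sym.length - i; the index strictly
-- increases each iteration, so the initial fuel sym.length suffices)
def aLoopF (sym : List String) (line : List (Int × Int)) :
    Nat → Nat → List (Int × Int) → List (Int × Int)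
  | 0, _, acc => acc
  | fuel + 1, i, acc =>
    if i < sym.length then
      if sym.getD i "" = "." then aLoopF sym line fuel (i + 1) acc
      else
        let j := aFindJ sym (sym.getD i "") i
        aLoopF sym line fuel (j + 1) (acc ++ aCheckSeg sym line i j)
    else acc

def check_line_capture (line : List (Int × Int)) (board : List (List String)) : List (Int × Int) :=
  aLoopF (pvSyms line board) line (pvSyms line board).length 0 []

-- ===== PORT B =====
-- forward DP pass: run_start.append(run_start[-1] if i > 0 and symbols[i] == symbols[i-1] else i)
-- (run_start[-1] is ported as getD (length - 1); the list is nonempty whenever the branch is taken)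
def bRunStart (sym : List String) : List Nat :=
  (List.range sym.length).foldl
    (fun L i => L ++ [if 0 < i ∧ sym.getD i "" = sym.getD (i - 1) "" then L.getD (L.length - 1) 0 else i]) []

-- backward DP pass over reversed(range(n)), then run_end.reverse()
def bRunEnd (sym : List String) : List Nat :=
  (((List.range sym.length).reverse).foldl
    (fun R i => R ++ [if i < sym.length - 1 ∧ sym.getD i "" = sym.getD (i + 1) "" then R.getD (R.length - 1) 0 else i]) []).reverse

-- final per-index filter: for i in range(n): … captured.append(line[i])
def check_line_capture_alt (line : List (Int × Int)) (board : List (List String)) :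
    List (Int × Int) :=
  (List.range (pvSyms line board).length).foldl (fun cap i =>
    let ch := (pvSyms line board).getD i ""
    if ch = "." then cap
    else
      let enemy := if ch = "T" then "O" else "T"
      let s := (bRunStart (pvSyms line board)).getD i 0
      let e := (bRunEnd (pvSyms line board)).getD i 0
      let leftE := 0 < s ∧ (pvSyms line board).getD (s - 1) "" = enemy
      let rightE := e < (pvSyms line board).length - 1 ∧ (pvSyms line board).getD (e + 1) "" = enemy
      if (s = 0 ∧ rightE) ∨ (e = (pvSyms line board).length - 1 ∧ leftE) ∨ (leftE ∧ rightE) then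
        cap ++ [line.getD i (0, 0)]
      else cap) []

-- ===== PRECONDITION & SPEC =====
-- Pre_: every (r, c) in line indexes board validly (Python semantics, negative indices from the end);
-- outside it A raises IndexError at 'board[r][c]'.
def Pre_check_line_capture (line : List (Int × Int)) (board : List (List String)) : Prop :=
  ∀ p ∈ line, ((PySem.List.pyGet? board p.1).bind (fun row => PySem.List.pyGet? row p.2)).isSome
instance (line : List (Int × Int)) (board : List (List String)) :
    Decidable (Pre_check_line_capture line board) := by unfold Pre_check_line_capture; infer_instance

def pvWitness_check_line_capture : (List (Int × Int)) × List (List String) :=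
  ([(0, 0), (0, 1), (0, 2)], [["T", "T", "O"]])

def Spec_check_line_capture (line : List (Int × Int)) (board : List (List String)) (out : List (Int × Int)) : Prop := out = check_line_capture_alt line board
instance (line : List (Int × Int)) (board : List (List String)) (out : List (Int × Int)) : Decidable (Spec_check_line_capture line board out) := by unfold Spec_check_line_capture; infer_instance

-- ===== CLAIM (what is proved, stated in full; the proofs are below) =====
def Claim_equal_check_line_capture : Prop := ∀ (line : List (Int × Int)) (board : List (List String)), Dom_check_line_capture line board → Pre_check_line_capture line board → Spec_check_line_capture line board (check_line_capture line board)

-- ===== LEMMAS AND PROOFS =====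

theorem flatMap_congr_mem {α β : Type} {l : List α} {f g : α → List β}
    (h : ∀ x ∈ l, f x = g x) : l.flatMap f = l.flatMap g := by
  induction l with
  | nil => rfl
  | cons a t ih =>
    simp only [List.flatMap_cons, h a (List.mem_cons_self),
      ih (fun x hx => h x (List.mem_cons_of_mem a hx))]

theorem flatMap_singleton_map {α β : Type} (l : List α) (f : α → β) :
    l.flatMap (fun x => [f x]) = l.map f := by
  induction l with
  | nil => rfl
  | cons a t ih => simp [ih]

-- run-start function: the recurrence B's forward pass computes
def runStart (sym : List String) : Nat → Nat
  | 0 => 0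
  | i + 1 => if sym.getD (i + 1) "" = sym.getD i "" then runStart sym i else i + 1

-- run-end function: the recurrence B's backward pass computes
def runEnd (sym : List String) (i : Nat) : Nat :=
  if i < sym.length - 1 ∧ sym.getD i "" = sym.getD (i + 1) "" then runEnd sym (i + 1) else i
  termination_by sym.length - i
  decreasing_by omega

theorem bRunStart_eq (sym : List String) :
    bRunStart sym = (List.range sym.length).map (runStart sym) := by
  unfold bRunStart
  generalize sym.length = n
  induction n with
  | zero => rfl
  | succ m ih =>
    rw [List.range_succ, List.foldl_append, ih, List.map_append, List.foldl_cons, List.foldl_nil]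
    congr 1
    cases m with
    | zero => simp [runStart]
    | succ k =>
      by_cases hq : sym.getD (k + 1) "" = sym.getD k ""
      · have hlen : ((List.range (k + 1)).map (runStart sym)).length = k + 1 := by simp
        have hget : ((List.range (k + 1)).map (runStart sym)).getD k 0 = runStart sym k := by
          rw [List.getD_eq_getElem _ _ (by simp)]; simp
        simp [hlen, runStart]
      · simp [runStart]

theorem bRunEnd_fold (sym : List String) :
    ∀ m, m ≤ sym.length →
      ((List.range' (sym.length - m) m).reverse).foldl
        (fun R i => R ++ [if i < sym.length - 1 ∧ sym.getD i "" = sym.getD (i + 1) "" then R.getD (R.length - 1) 0 else i]) []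
      = ((List.range' (sym.length - m) m).map (runEnd sym)).reverse := by
  intro m
  induction m with
  | zero => intro _; rfl
  | succ k ih =>
    intro hm
    have hsplit : List.range' (sym.length - (k + 1)) (k + 1) =
        (sym.length - (k + 1)) :: List.range' (sym.length - k) k := by
      rw [List.range'_succ, show sym.length - (k + 1) + 1 = sym.length - k from by omega]
    rw [hsplit]
    simp only [List.reverse_cons, List.foldl_append, List.foldl_cons, List.foldl_nil,
      List.map_cons, List.reverse_cons]
    rw [ih (by omega)]
    congr 1
    set i := sym.length - (k + 1) with hi
    by_cases hc : i < sym.length - 1 ∧ sym.getD i "" = sym.getD (i + 1) ""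
    · have hk : 0 < k := by have := hc.1; omega
      have hlen : (((List.range' (sym.length - k) k).map (runEnd sym)).reverse).length = k := by simp
      have hget : (((List.range' (sym.length - k) k).map (runEnd sym)).reverse).getD (k - 1) 0
          = runEnd sym (sym.length - k) := by
        rw [List.getD_eq_getElem _ _ (by simp; omega)]
        rw [List.getElem_reverse]
        simp only [List.getElem_map, List.getElem_range']
        congr 1
        simp only [List.length_map, List.length_range']
        omega
      have hik : i + 1 = sym.length - k := by omega
      rw [if_pos hc, hlen, hget]
      congr 1
      conv_rhs => rw [runEnd, if_pos hc]
      rw [hik]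
    · rw [if_neg hc, runEnd, if_neg hc]

theorem bRunEnd_eq (sym : List String) :
    bRunEnd sym = (List.range sym.length).map (runEnd sym) := by
  unfold bRunEnd
  have h0 : List.range sym.length = List.range' (sym.length - sym.length) sym.length := by
    simp [List.range_eq_range']
  rw [h0, bRunEnd_fold sym sym.length le_rfl, List.reverse_reverse]

theorem runStart_getD (sym : List String) (i : Nat) (hi : i < sym.length) :
    (bRunStart sym).getD i 0 = runStart sym i := by
  rw [bRunStart_eq, List.getD_eq_getElem _ _ (by simp [hi])]; simp

theorem runEnd_getD (sym : List String) (i : Nat) (hi : i < sym.length) :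
    (bRunEnd sym).getD i 0 = runEnd sym i := by
  rw [bRunEnd_eq, List.getD_eq_getElem _ _ (by simp [hi])]; simp

-- within a maximal run [s, e], runStart is s …
theorem runStart_run (sym : List String) (s : Nat)
    (hleft : s = 0 ∨ sym.getD (s - 1) "" ≠ sym.getD s "") :
    ∀ i, s ≤ i → (∀ k, s ≤ k → k ≤ i → sym.getD k "" = sym.getD s "") → runStart sym i = s := by
  intro i
  induction i with
  | zero => intro h _; interval_cases s; rfl
  | succ k ih =>
    intro hsi hconst
    by_cases hsk : s = k + 1
    · subst hsk
      have hne : sym.getD (k + 1) "" ≠ sym.getD k "" := by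
        rcases hleft with h0 | h0
        · omega
        · simpa using (Ne.symm h0)
      rw [runStart, if_neg hne]
    · have hsk' : s ≤ k := by omega
      have heq : sym.getD (k + 1) "" = sym.getD k "" := by
        rw [hconst (k + 1) (by omega) le_rfl, hconst k hsk' (by omega)]
      simp only [runStart, heq, if_true]
      exact ih hsk' (fun t h1 h2 => hconst t h1 (by omega))

-- … and runEnd is e
theorem runEnd_run (sym : List String) (e : Nat) (he : e < sym.length)
    (hright : e + 1 < sym.length → sym.getD (e + 1) "" ≠ sym.getD e "") :
    ∀ d i, e - i = d → i ≤ e → (∀ k, i ≤ k → k ≤ e → sym.getD k "" = sym.getD e "") →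
      runEnd sym i = e := by
  intro d
  induction d with
  | zero =>
    intro i hd hie _
    have : i = e := by omega
    subst this
    rw [runEnd, if_neg]
    rintro ⟨h1, h2⟩
    exact hright (by omega) h2.symm
  | succ m ih =>
    intro i hd hie hconst
    have hlt : i < e := by omega
    have heq : sym.getD i "" = sym.getD (i + 1) "" := by
      rw [hconst i le_rfl (by omega), hconst (i + 1) (by omega) (by omega)]
    rw [runEnd, if_pos ⟨by omega, heq⟩]
    exact ih (i + 1) (by omega) (by omega) (fun k h1 h2 => hconst k (by omega) h2)

-- the per-index contribution of B (what the fold body appends at i)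
def gB (sym : List String) (line : List (Int × Int)) (i : Nat) : List (Int × Int) :=
  if sym.getD i "" = "." then []
  else
    let enemy := if sym.getD i "" = "T" then "O" else "T"
    let s := runStart sym i
    let e := runEnd sym i
    if (s = 0 ∧ (e < sym.length - 1 ∧ sym.getD (e + 1) "" = enemy)) ∨
       (e = sym.length - 1 ∧ (0 < s ∧ sym.getD (s - 1) "" = enemy)) ∨
       ((0 < s ∧ sym.getD (s - 1) "" = enemy) ∧ (e < sym.length - 1 ∧ sym.getD (e + 1) "" = enemy)) then
      [line.getD i (0, 0)]
    else []

theorem bFold (sym : List String) (line : List (Int × Int)) :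
    ∀ (l : List Nat) (acc : List (Int × Int)), (∀ i ∈ l, i < sym.length) →
      l.foldl (fun cap i =>
        let ch := sym.getD i ""
        if ch = "." then cap
        else
          let enemy := if ch = "T" then "O" else "T"
          let s := (bRunStart sym).getD i 0
          let e := (bRunEnd sym).getD i 0
          let leftE := 0 < s ∧ sym.getD (s - 1) "" = enemy
          let rightE := e < sym.length - 1 ∧ sym.getD (e + 1) "" = enemy
          if (s = 0 ∧ rightE) ∨ (e = sym.length - 1 ∧ leftE) ∨ (leftE ∧ rightE) then
            cap ++ [line.getD i (0, 0)]
          else cap) acc = acc ++ l.flatMap (gB sym line) := by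
  intro l
  induction l with
  | nil => intro acc _; simp
  | cons a t ih =>
    intro acc h
    have ha : a < sym.length := h a List.mem_cons_self
    rw [List.foldl_cons, List.flatMap_cons, ih _ (fun i hi => h i (List.mem_cons_of_mem a hi))]
    have hbody : (let ch := sym.getD a ""
        if ch = "." then acc
        else
          let enemy := if ch = "T" then "O" else "T"
          let s := (bRunStart sym).getD a 0
          let e := (bRunEnd sym).getD a 0
          let leftE := 0 < s ∧ sym.getD (s - 1) "" = enemy
          let rightE := e < sym.length - 1 ∧ sym.getD (e + 1) "" = enemy
          if (s = 0 ∧ rightE) ∨ (e = sym.length - 1 ∧ leftE) ∨ (leftE ∧ rightE) then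
            acc ++ [line.getD a (0, 0)]
          else acc) = acc ++ gB sym line a := by
      simp only [runStart_getD sym a ha, runEnd_getD sym a ha, gB]
      split_ifs <;> simp
    rw [hbody, List.append_assoc]

theorem alt_eq_flatMap (line : List (Int × Int)) (board : List (List String)) :
    check_line_capture_alt line board
      = (List.range (pvSyms line board).length).flatMap (gB (pvSyms line board) line) := by
  unfold check_line_capture_alt
  rw [bFold (pvSyms line board) line (List.range (pvSyms line board).length) []
    (by intro i hi; simpa using hi)]
  simp

theorem le_aFindJF (sym : List String) (base : String) :
    ∀ fuel j, j ≤ aFindJF sym base fuel j := by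
  intro fuel
  induction fuel with
  | zero => intro j; simp [aFindJF]
  | succ f ih =>
    intro j
    simp only [aFindJF]
    split_ifs with h
    · exact le_trans (by omega) (ih (j + 1))
    · exact le_rfl

theorem le_aFindJ (sym : List String) (base : String) (j : Nat) : j ≤ aFindJ sym base j :=
  le_aFindJF sym base _ j

-- the run decomposition A computes, by jump recursion (proof-side only)
def runsFrom (sym : List String) (i : Nat) : List (String × Nat × Nat) :=
  if h : i < sym.length then
    (sym.getD i "", i, aFindJ sym (sym.getD i "") i) ::
      runsFrom sym (aFindJ sym (sym.getD i "") i + 1)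
  else []
  termination_by sym.length - i
  decreasing_by have := le_aFindJ sym (sym.getD i "") i; omega

theorem aFindJF_lt (sym : List String) (base : String) :
    ∀ fuel j, j < sym.length → aFindJF sym base fuel j < sym.length := by
  intro fuel
  induction fuel with
  | zero => intro j h; simpa [aFindJF] using h
  | succ f ih =>
    intro j h
    simp only [aFindJF]
    split_ifs with h'
    · exact ih (j + 1) h'.1
    · exact h

theorem aFindJ_lt (sym : List String) (base : String) (j : Nat) (h : j < sym.length) :
    aFindJ sym base j < sym.length := aFindJF_lt sym base _ j h

theorem aFindJF_all (sym : List String) (base : String) :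
    ∀ fuel j, sym.getD j "" = base →
      ∀ k, j ≤ k → k ≤ aFindJF sym base fuel j → sym.getD k "" = base := by
  intro fuel
  induction fuel with
  | zero =>
    intro j hb k hk1 hk2
    simp only [aFindJF] at hk2
    have : k = j := by omega
    subst this; exact hb
  | succ f ih =>
    intro j hb k hk1 hk2
    simp only [aFindJF] at hk2
    by_cases h' : j + 1 < sym.length ∧ sym.getD (j + 1) "" = base
    · rw [if_pos h'] at hk2
      rcases Nat.eq_or_lt_of_le hk1 with rfl | hlt
      · exact hb
      · exact ih (j + 1) h'.2 k (by omega) hk2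
    · rw [if_neg h'] at hk2
      have : k = j := by omega
      subst this; exact hb

theorem aFindJ_all (sym : List String) (base : String) (j : Nat)
    (hb : sym.getD j "" = base) :
    ∀ k, j ≤ k → k ≤ aFindJ sym base j → sym.getD k "" = base :=
  aFindJF_all sym base _ j hb

theorem aFindJF_max (sym : List String) (base : String) :
    ∀ fuel j, sym.length ≤ fuel + j → aFindJF sym base fuel j + 1 < sym.length →
      sym.getD (aFindJF sym base fuel j + 1) "" ≠ base := by
  intro fuel
  induction fuel with
  | zero =>
    intro j hf h
    simp only [aFindJF] at h
    omega
  | succ f ih =>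
    intro j hf h
    simp only [aFindJF] at h ⊢
    by_cases h' : j + 1 < sym.length ∧ sym.getD (j + 1) "" = base
    · rw [if_pos h'] at h ⊢
      exact ih (j + 1) (by omega) h
    · rw [if_neg h'] at h ⊢
      intro hc
      exact h' ⟨h, hc⟩

theorem aFindJ_max (sym : List String) (base : String) (j : Nat)
    (h : aFindJ sym base j + 1 < sym.length) :
    sym.getD (aFindJ sym base j + 1) "" ≠ base := by
  have hj : j < sym.length := by
    have := le_aFindJ sym base j
    omega
  exact aFindJF_max sym base (sym.length - j) j (by omega) h

theorem aFindJ_eq_of_next (sym : List String) (base : String) (j : Nat)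
    (h1 : j + 1 < sym.length) (h2 : sym.getD (j + 1) "" = base) :
    aFindJ sym base j = aFindJ sym base (j + 1) := by
  unfold aFindJ
  rw [show sym.length - j = (sym.length - (j + 1)) + 1 by omega]
  simp only [aFindJF]
  rw [if_pos ⟨h1, h2⟩]

theorem aFindJ_stop (sym : List String) (base : String) (j : Nat)
    (h : ¬(j + 1 < sym.length ∧ sym.getD (j + 1) "" = base)) :
    aFindJ sym base j = j := by
  unfold aFindJ
  cases hf : sym.length - j with
  | zero => rfl
  | succ f => simp only [aFindJF]; rw [if_neg h]

theorem aScanF_true (sym : List String) (base : String) (e : Nat) :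
    ∀ fuel i, (∀ k, i ≤ k → k ≤ e → sym.getD k "" = base) →
      aScanF sym base fuel i e = true := by
  intro fuel
  induction fuel with
  | zero => intro i _; rfl
  | succ f ih =>
    intro i hall
    simp only [aScanF]
    split_ifs with h1 h2
    · exact absurd (hall i le_rfl (by omega)) h2
    · exact ih (i + 1) (fun k hk1 hk2 => hall k (by omega) hk2)
    · rfl

theorem aScan_true (sym : List String) (base : String) (i e : Nat)
    (hall : ∀ k, i ≤ k → k ≤ e → sym.getD k "" = base) : aScan sym base i e = true :=
  aScanF_true sym base e _ i hall

-- dot-skip: a '.' at i contributes nothing and the decomposition after it is unchanged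
theorem runsFrom_dot (sym : List String) (line : List (Int × Int)) (i : Nat)
    (hi : i < sym.length) (hdot : sym.getD i "" = ".") :
    (runsFrom sym i).flatMap (fun r => aCheckSeg sym line r.2.1 r.2.2) =
      (runsFrom sym (i + 1)).flatMap (fun r => aCheckSeg sym line r.2.1 r.2.2) := by
  rw [runsFrom, dif_pos hi]
  by_cases hnext : i + 1 < sym.length ∧ sym.getD (i + 1) "" = sym.getD i ""
  · have hJeq : aFindJ sym (sym.getD i "") i = aFindJ sym (sym.getD i "") (i + 1) :=
      aFindJ_eq_of_next sym _ i hnext.1 hnext.2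
    conv_rhs => rw [runsFrom]
    rw [dif_pos hnext.1, hnext.2, ← hJeq]
    have hdot' : sym[i]?.getD "" = "." := by simpa using hdot
    have hdot1 : sym[i + 1]?.getD "" = "." := by
      have := hnext.2.trans hdot; simpa using this
    simp [aCheckSeg, hdot', hdot1]
  · rw [aFindJ_stop sym (sym.getD i "") i hnext]
    have hdot' : sym[i]?.getD "" = "." := by simpa using hdot
    simp [aCheckSeg, hdot']

theorem aLoopF_eq (sym : List String) (line : List (Int × Int)) :
    ∀ fuel i acc, sym.length ≤ fuel + i →
      aLoopF sym line fuel i acc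
        = acc ++ (runsFrom sym i).flatMap (fun r => aCheckSeg sym line r.2.1 r.2.2) := by
  intro fuel
  induction fuel with
  | zero =>
    intro i acc hf
    rw [runsFrom, dif_neg (by omega)]
    simp [aLoopF]
  | succ f ih =>
    intro i acc hf
    simp only [aLoopF]
    by_cases hi : i < sym.length
    · rw [if_pos hi]
      by_cases hdot : sym.getD i "" = "."
      · rw [if_pos hdot, ih (i + 1) acc (by omega), ← runsFrom_dot sym line i hi hdot]
      · rw [if_neg hdot]
        have hiJ : i ≤ aFindJ sym (sym.getD i "") i := le_aFindJ sym _ i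
        rw [ih (aFindJ sym (sym.getD i "") i + 1) _ (by omega)]
        conv_rhs => rw [runsFrom]
        rw [dif_pos hi]
        simp
    · rw [if_neg hi, runsFrom, dif_neg hi]
      simp

-- one maximal run's chunk in A equals the per-index contributions of B over that run
theorem seg_chunk (sym : List String) (line : List (Int × Int)) (s e : Nat)
    (hse : s ≤ e) (hen : e < sym.length)
    (hconst : ∀ k, s ≤ k → k ≤ e → sym.getD k "" = sym.getD s "")
    (hleft : s = 0 ∨ sym.getD (s - 1) "" ≠ sym.getD s "")
    (hright : e + 1 < sym.length → sym.getD (e + 1) "" ≠ sym.getD s "") :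
    aCheckSeg sym line s e = (List.range' s (e + 1 - s)).flatMap (gB sym line) := by
  have hgb : ∀ k ∈ List.range' s (e + 1 - s),
      gB sym line k =
        (if sym.getD s "" = "." then []
         else
           let enemy := if sym.getD s "" = "T" then "O" else "T"
           if (s = 0 ∧ (e < sym.length - 1 ∧ sym.getD (e + 1) "" = enemy)) ∨
              (e = sym.length - 1 ∧ (0 < s ∧ sym.getD (s - 1) "" = enemy)) ∨
              ((0 < s ∧ sym.getD (s - 1) "" = enemy) ∧ (e < sym.length - 1 ∧ sym.getD (e + 1) "" = enemy)) then
             [line.getD k (0, 0)]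
           else []) := by
    intro k hk
    rw [List.mem_range'_1] at hk
    have hks : s ≤ k := hk.1
    have hke : k ≤ e := by omega
    have hkval : sym.getD k "" = sym.getD s "" := hconst k hks hke
    have hrs : runStart sym k = s :=
      runStart_run sym s hleft k hks (fun t h1 h2 => hconst t h1 (by omega))
    have hre : runEnd sym k = e := by
      refine runEnd_run sym e hen
        (fun hlt hc => hright hlt (by rw [hc]; exact (hconst e hse le_rfl))) (e - k) k rfl hke
        (fun t h1 h2 => by rw [hconst t (by omega) h2, hconst e hse le_rfl])
    simp only [gB, hkval, hrs, hre]
  rw [flatMap_congr_mem hgb]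
  by_cases hdot : sym.getD s "" = "."
  · have hdot' : sym[s]?.getD "" = "." := by simpa using hdot
    simp [aCheckSeg, hdot']
  · have hscan : aScan sym (sym.getD s "") (s + 1) e = true :=
      aScan_true sym _ (s + 1) e (fun k h1 h2 => hconst k (by omega) h2)
    have h3 : (e < sym.length - 1) ↔ (e + 1 < sym.length) := by omega
    unfold aCheckSeg
    simp only [hdot, hscan, Bool.true_eq_false, if_false]
    set enemy := if sym.getD s "" = "T" then "O" else "T" with hen'
    have hLE : ((if 0 < s then some (sym.getD (s - 1) "") else none) = some enemy)
        ↔ (0 < s ∧ sym.getD (s - 1) "" = enemy) := by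
      split_ifs with h <;> simp [h]
    have hRE : ((if e < sym.length - 1 then some (sym.getD (e + 1) "") else none) = some enemy)
        ↔ (e < sym.length - 1 ∧ sym.getD (e + 1) "" = enemy) := by
      split_ifs with h <;> simp [h]
    by_cases hcond : (s = 0 ∧ (e < sym.length - 1 ∧ sym.getD (e + 1) "" = enemy)) ∨
        (e = sym.length - 1 ∧ (0 < s ∧ sym.getD (s - 1) "" = enemy)) ∨
        ((0 < s ∧ sym.getD (s - 1) "" = enemy) ∧ (e < sym.length - 1 ∧ sym.getD (e + 1) "" = enemy))
    · rw [if_pos (by rw [hLE, hRE]; exact hcond), PySem.List.foldl_append_singleton_eq_map,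
        flatMap_congr_mem (g := fun k => [line.getD k (0, 0)])
          (fun k _ => if_pos hcond),
        flatMap_singleton_map]
      simp
    · rw [if_neg (by rw [hLE, hRE]; exact hcond),
        flatMap_congr_mem (g := fun _ => ([] : List (Int × Int)))
          (fun k _ => if_neg hcond)]
      simp
-- A's run decomposition, flattened through the chunks, is B's per-index flatMap
theorem runs_eq (sym : List String) (line : List (Int × Int)) :
    ∀ d i, sym.length - i ≤ d → (i = 0 ∨ sym.getD (i - 1) "" ≠ sym.getD i "") →
      (runsFrom sym i).flatMap (fun r => aCheckSeg sym line r.2.1 r.2.2)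
        = (List.range' i (sym.length - i)).flatMap (gB sym line) := by
  intro d
  induction d with
  | zero =>
    intro i hd _
    have hni : ¬ i < sym.length := by omega
    rw [runsFrom, dif_neg hni, show sym.length - i = 0 by omega]
    simp
  | succ m ih =>
    intro i hd hleft
    by_cases hi : i < sym.length
    · rw [runsFrom, dif_pos hi]
      have hiJ : i ≤ aFindJ sym (sym.getD i "") i := le_aFindJ sym _ i
      have hJn : aFindJ sym (sym.getD i "") i < sym.length := aFindJ_lt sym _ i hi
      set J := aFindJ sym (sym.getD i "") i with hJdef
      have hconst : ∀ k, i ≤ k → k ≤ J → sym.getD k "" = sym.getD i "" := by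
        intro k h1 h2; exact aFindJ_all sym (sym.getD i "") i rfl k h1 h2
      have hrightJ : J + 1 < sym.length → sym.getD (J + 1) "" ≠ sym.getD i "" := by
        intro hlt; rw [hJdef] at hlt ⊢; exact aFindJ_max sym (sym.getD i "") i hlt
      have hsplit : sym.length - i = (J + 1 - i) + (sym.length - (J + 1)) := by omega
      rw [hsplit, ← List.range'_append_1, List.flatMap_append, List.flatMap_cons,
        show i + (J + 1 - i) = J + 1 by omega]
      congr 1
      · exact seg_chunk sym line i J hiJ hJn hconst hleft hrightJ
      · by_cases hJ1 : J + 1 < sym.length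
        · refine ih (J + 1) (by omega) (Or.inr ?_)
          simp only [Nat.add_sub_cancel]
          intro hc
          exact hrightJ hJ1 (hc.symm.trans (hconst J hiJ le_rfl))
        · rw [runsFrom, dif_neg hJ1, show sym.length - (J + 1) = 0 by omega]
          simp
    · rw [runsFrom, dif_neg hi, show sym.length - i = 0 by omega]
      simp

-- ===== VERDICT (by name: the statement is the Claim_ definition above) =====
theorem check_line_capture_spec : Claim_equal_check_line_capture := by
  intro line board _ _
  unfold Spec_check_line_capture check_line_capture
  rw [aLoopF_eq (pvSyms line board) line (pvSyms line board).length 0 [] (by omega),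
    alt_eq_flatMap, List.nil_append,
    runs_eq (pvSyms line board) line (pvSyms line board).length 0 (by omega) (Or.inl rfl)]
  simp [List.range_eq_range']
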